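-- pv_equiv track=rewrite | github.com/PAWSLabUniversityOfPittsburgh/Concept-Extraction | FACE/model/feature_extraction.py | feature_contain_special_characters
-- ===== SOURCE A (Python) =====
-- def feature_contain_special_characters(feature_values):
--     """
--
--     :param feature_values:
--     :return: <string>
--     """
--     special_chars = ['', '', '']
--
--     for c in str(feature_values[0]):
--         if c == '-':
--             special_chars[0] = '-'
--         elif c == '/':
--             special_chars[1] = '/'
--         elif c.isdigit():
--             special_chars[2] = 'n'
--
--     return ''.join(special_chars)
-- ===== SOURCE B (Python) =====
-- def feature_contain_special_characters(feature_values):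
--     s = str(feature_values[0])
--     return (('-' if '-' in s else '')
--             + ('/' if '/' in s else '')
--             + ('n' if any(c.isdigit() for c in s) else ''))
-- ===== Notes on version B (the rewrite author's own statement) =====
-- stated objective: idiomatic
-- what changed: Replaces the single flag-setting loop with three independent presence tests (two substring containment checks and one any-over-digits) concatenated in the fixed '-','/','n' order.
import Mathlib
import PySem

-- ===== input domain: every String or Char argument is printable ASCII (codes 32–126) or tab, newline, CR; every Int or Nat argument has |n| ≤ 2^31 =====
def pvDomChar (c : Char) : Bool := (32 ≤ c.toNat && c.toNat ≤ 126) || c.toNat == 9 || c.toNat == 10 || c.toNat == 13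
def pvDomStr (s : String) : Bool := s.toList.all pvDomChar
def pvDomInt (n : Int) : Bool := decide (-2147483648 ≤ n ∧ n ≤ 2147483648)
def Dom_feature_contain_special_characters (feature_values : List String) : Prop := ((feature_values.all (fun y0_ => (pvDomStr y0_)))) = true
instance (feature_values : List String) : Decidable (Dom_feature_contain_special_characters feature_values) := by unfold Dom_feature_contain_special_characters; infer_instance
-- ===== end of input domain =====

-- B replaces A's single flag-setting loop by three independent presence tests; equivalence proved on nonempty input lists.

-- ===== PORT A =====
-- the loop of A: one pass over the characters, setting the three flag cells in place
def pvLoopA : List Char → String × String × String → String × String × String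
  | [], st => st
  | c :: rest, (a, b, n) =>
    if c = '-' then pvLoopA rest ("-", b, n)
    else if c = '/' then pvLoopA rest (a, "/", n)
    else if PySem.Chars.isdigit c then pvLoopA rest (a, b, "n")
    else pvLoopA rest (a, b, n)

def feature_contain_special_characters (feature_values : List String) : String :=
  -- feature_values[0] raises IndexError on []; Pre_ excludes the empty list
  let s := PySem.List.pyGetD feature_values 0 ""
  let st := pvLoopA s.toList ("", "", "")
  PySem.Str.join "" [st.1, st.2.1, st.2.2]

-- ===== PORT B =====
def feature_contain_special_characters_alt (feature_values : List String) : String :=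
  let s := PySem.List.pyGetD feature_values 0 ""
  (if PySem.Str.isIn "-" s then "-" else "")
    ++ ((if PySem.Str.isIn "/" s then "/" else "")
    ++ (if s.toList.any PySem.Chars.isdigit then "n" else ""))

-- ===== PRECONDITION & SPEC =====
-- A raises IndexError on the empty list (feature_values[0]); B raises there too, so Pre_ excludes it.
def Pre_feature_contain_special_characters (feature_values : List String) : Prop := feature_values ≠ []
instance (feature_values : List String) : Decidable (Pre_feature_contain_special_characters feature_values) := by unfold Pre_feature_contain_special_characters; infer_instance
def pvWitness_feature_contain_special_characters : List String := ["a-b/3"]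

def Spec_feature_contain_special_characters (feature_values : List String) (out : String) : Prop := out = feature_contain_special_characters_alt feature_values
instance (feature_values : List String) (out : String) : Decidable (Spec_feature_contain_special_characters feature_values out) := by unfold Spec_feature_contain_special_characters; infer_instance

-- ===== CLAIM (what is proved, stated in full; the proofs are below) =====
def Claim_equal_feature_contain_special_characters : Prop := ∀ (feature_values : List String), Dom_feature_contain_special_characters feature_values → Pre_feature_contain_special_characters feature_values → Spec_feature_contain_special_characters feature_values (feature_contain_special_characters feature_values)

-- ===== LEMMAS AND PROOFS =====

-- characterisation of A's loop: each flag cell ends '-'/'/' /'n' iff the pass saw such a char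
theorem pvLoopA_eq (cs : List Char) (a b n : String) :
    pvLoopA cs (a, b, n) =
      ((if '-' ∈ cs then "-" else a),
       (if '/' ∈ cs then "/" else b),
       (if cs.any PySem.Chars.isdigit then "n" else n)) := by
  induction cs generalizing a b n with
  | nil => simp [pvLoopA]
  | cons c rest ih =>
    have hdd : PySem.Chars.isdigit '-' = false := by decide
    have hds : PySem.Chars.isdigit '/' = false := by decide
    by_cases h1 : c = '-'
    · subst h1
      simp [pvLoopA, ih, hdd]
    · by_cases h2 : c = '/'
      · subst h2
        simp [pvLoopA, ih, h1, hds]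
      · by_cases h3 : PySem.Chars.isdigit c
        · simp [pvLoopA, h1, h2, h3, ih, Ne.symm h1, Ne.symm h2]
        · simp [pvLoopA, h1, h2, h3, ih, Ne.symm h1, Ne.symm h2]

-- singleton-substring containment is character membership
theorem pvIsIn_singleton (c : Char) (s : String) :
    PySem.Str.isIn (String.ofList [c]) s = true ↔ c ∈ s.toList := by
  rw [PySem.Str.isIn_iff_infix]
  have hc : (String.ofList [c]).toList = [c] := by simp
  rw [hc]
  constructor
  · rintro ⟨l, r, h⟩
    rw [← h]; simp
  · intro h
    obtain ⟨l, r, h⟩ := List.append_of_mem h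
    exact ⟨l, r, by simp [h]⟩

-- ===== VERDICT (by name: the statement is the Claim_ definition above) =====
theorem feature_contain_special_characters_spec : Claim_equal_feature_contain_special_characters := by
  intro fv _ _
  unfold Spec_feature_contain_special_characters
  unfold feature_contain_special_characters feature_contain_special_characters_alt
  simp only [pvLoopA_eq]
  have h1 := pvIsIn_singleton '-' (PySem.List.pyGetD fv 0 "")
  have h2 := pvIsIn_singleton '/' (PySem.List.pyGetD fv 0 "")
  have e1 : ("-" : String) = String.ofList ['-'] := rfl
  have e2 : ("/" : String) = String.ofList ['/'] := rfl
  rw [e1, e2]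
  split_ifs with hd hs hn hn hs hn hn hd hs hn hn hs hn hn <;>
    simp_all [PySem.Str.join, PySem.Chars.join] <;> rfl
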